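-- pv_equiv track=rewrite | github.com/nonoMain/dotfiles | nvim/.config/nvim/pythonx/snippets.py | _parse_comments
-- ===== SOURCE A (Python) =====
-- import string, vim, re
--
-- def _parse_comments(s):
-- 	""" Parses vim's comments option to extract comment format """
-- 	i = iter(s.split(","))
--
-- 	rv = []
-- 	try:
-- 		while True:
-- 			# get the flags and text of a comment part
-- 			flags, text = next(i).split(':', 1)
--
-- 			if len(flags) == 0:
-- 				rv.append(('OTHER', text, text, text, ""))
-- 			# parse 3-part comment, but ignore those with O flag
-- 			elif 's' in flags and 'O' not in flags:
-- 				ctriple = ["TRIPLE"]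
-- 				indent = ""
--
-- 				if flags[-1] in string.digits:
-- 					indent = " " * int(flags[-1])
-- 				ctriple.append(text)
--
-- 				flags, text = next(i).split(':', 1)
-- 				assert flags[0] == 'm'
-- 				ctriple.append(text)
--
-- 				flags, text = next(i).split(':', 1)
-- 				assert flags[0] == 'e'
-- 				ctriple.append(text)
-- 				ctriple.append(indent)
--
-- 				rv.append(ctriple)
-- 			elif 'b' in flags:
-- 				if len(text) == 1:
-- 					rv.insert(0, ("SINGLE_CHAR", text, text, text, ""))
-- 	except StopIteration:
-- 		return rv
-- ===== SOURCE B (Python) =====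
-- import string
--
-- def _parse_comments(s):
-- 	""" Parses vim's comments option to extract comment format """
-- 	# Stage 0: split every comma-part at its first colon up front.
-- 	pairs = [part.split(':', 1) for part in s.split(',')]
-- 	n = len(pairs)
-- 	# Stage 1: group the parts into tagged entries, consuming the m/e parts of
-- 	# each 3-part comment; an incomplete 3-part comment at the end stops the walk.
-- 	entries = []  # (is_single_char, entry)
-- 	i = 0
-- 	while i < n:
-- 		flags, text = pairs[i]
-- 		if flags and 's' in flags and 'O' not in flags:
-- 			if i + 2 >= n:
-- 				break
-- 			assert pairs[i + 1][0][0] == 'm' and pairs[i + 2][0][0] == 'e'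
-- 			indent = " " * int(flags[-1]) if flags[-1] in string.digits else ""
-- 			entries.append((False, ["TRIPLE", text, pairs[i + 1][1], pairs[i + 2][1], indent]))
-- 			i += 3
-- 			continue
-- 		if not flags:
-- 			entries.append((False, ('OTHER', text, text, text, "")))
-- 		elif 'b' in flags and len(text) == 1:
-- 			entries.append((True, ("SINGLE_CHAR", text, text, text, "")))
-- 		i += 1
-- 	# Stage 2: SINGLE_CHAR entries, latest first, go in front of the rest in encounter order.
-- 	return [e for f, e in reversed(entries) if f] + [e for f, e in entries if not f]
-- ===== Notes on version B (the rewrite author's own statement) =====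
-- stated objective: alternative
-- what changed: Replaces A's lazy iterator/StopIteration while-True loop that mutates rv in place (append / insert(0)) by a three-stage pipeline: pre-split every comma-part at its first colon up front, group the pre-split pairs into a tagged intermediate entry list with explicit index jumps (break on an incomplete 3-part comment), then assemble the result with two filtering comprehensions (reversed SINGLE_CHAR entries first, the rest in order).
import Mathlib
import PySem

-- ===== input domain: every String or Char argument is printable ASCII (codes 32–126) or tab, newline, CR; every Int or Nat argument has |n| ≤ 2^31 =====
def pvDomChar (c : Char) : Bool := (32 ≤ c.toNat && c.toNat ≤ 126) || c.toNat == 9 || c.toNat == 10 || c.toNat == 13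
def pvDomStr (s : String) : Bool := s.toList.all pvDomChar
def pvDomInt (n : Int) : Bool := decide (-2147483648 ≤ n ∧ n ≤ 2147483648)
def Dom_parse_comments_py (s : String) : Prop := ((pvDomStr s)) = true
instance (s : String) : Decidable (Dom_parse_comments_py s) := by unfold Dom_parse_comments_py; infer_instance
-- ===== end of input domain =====

set_option maxHeartbeats 1000000


-- B replaces A's lazy iterator loop that mutates rv (append / insert(0)) by a three-stage
-- pipeline: pre-split all parts, group them into a tagged intermediate list with index jumps,
-- then assemble the result with two filtering passes (objective: alternative decomposition).
-- Equality of return values is proved on Pre_ (inputs where the Python A raises no exception).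

-- `p.split(':', 1)` destructured into exactly two pieces; on a part with no colon Python raises
-- ValueError (excluded by Pre_), the ports return (p, "") there.
def pvSplit2 (p : String) : String × String :=
  match PySem.Str.splitMax? p ":" 1 with
  | some [f, t] => (f, t)
  | _ => (p, "")

-- `" " * int(flags[-1]) if flags[-1] in string.digits else ""` (flags nonempty at both call sites)
def pvIndent (flags : String) : String :=
  match flags.toList.getLast? with
  | some c => if PySem.Chars.isdigit c then String.ofList (List.replicate (c.toNat - 48) ' ') else ""
  | none => ""

-- ===== PORT A =====
-- A's while-True over `next(i)`: recursion over the remaining parts carrying rv;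
-- an exhausted iterator (empty list) is the caught StopIteration, returning rv.
def pvGoA : List String → List (List String) → List (List String)
  | [], rv => rv
  | p :: rest, rv =>
    match pvSplit2 p with
    | (flags, text) =>
      if flags.length = 0 then
        pvGoA rest (rv ++ [["OTHER", text, text, text, ""]])
      else if PySem.Str.isIn "s" flags && !PySem.Str.isIn "O" flags then
        let indent := pvIndent flags
        match rest with
        | [] => rv
        | m :: rest2 =>
          match pvSplit2 m with
          | (_, mtext) =>
            match rest2 with
            | [] => rv
            | e :: rest3 =>
              match pvSplit2 e with
              | (_, etext) =>
                pvGoA rest3 (rv ++ [["TRIPLE", text, mtext, etext, indent]])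
      else if PySem.Str.isIn "b" flags then
        if text.length = 1 then
          pvGoA rest ([["SINGLE_CHAR", text, text, text, ""]] ++ rv)
        else pvGoA rest rv
      else pvGoA rest rv

def parse_comments_py (s : String) : List (List String) :=
  pvGoA ((PySem.Str.split? s ",").getD []) []

-- ===== PORT B =====
-- B's stage 1: the index walk over the pre-split pairs, written as the equivalent structural
-- recursion over the remaining pairs (i → the suffix from i); `break` returns the entries so far.
def pvGroupB : List (String × String) → List (Bool × List String)
  | [] => []
  | (flags, text) :: rest =>
    if !(flags.length == 0) && PySem.Str.isIn "s" flags && !PySem.Str.isIn "O" flags then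
      if rest.length < 2 then []   -- i + 2 >= n: break
      else
        (false, ["TRIPLE", text, (rest.getD 0 ("", "")).2, (rest.getD 1 ("", "")).2,
          pvIndent flags]) :: pvGroupB (rest.drop 2)
    else if flags.length == 0 then
      (false, ["OTHER", text, text, text, ""]) :: pvGroupB rest
    else if PySem.Str.isIn "b" flags && text.length == 1 then
      (true, ["SINGLE_CHAR", text, text, text, ""]) :: pvGroupB rest
    else pvGroupB rest
termination_by l => l.length
decreasing_by all_goals (simp; try omega)

-- stage 0 (pre-split every part) then stage 1, then stage 2: the two filtering comprehensions.
def parse_comments_py_alt (s : String) : List (List String) :=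
  let pairs := ((PySem.Str.split? s ",").getD []).map pvSplit2
  let entries := pvGroupB pairs
  (entries.reverse.filter (·.1)).map (·.2) ++ (entries.filter (fun p => !p.1)).map (·.2)

-- ===== PRECONDITION & SPEC =====
-- The grammar of inputs on which Python A returns normally: every consumed comma-part contains
-- a colon, and a 3-part ("s" without "O") opener is followed, as far as the list reaches, by a part
-- whose flags start with 'm' and then one whose flags start with 'e' (otherwise ValueError /
-- AssertionError / IndexError is raised).
def pvPreB : List String → Bool
  | [] => true
  | p :: rest =>
    PySem.Str.isIn ":" p &&
    (match pvSplit2 p with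
     | (flags, _) =>
       if flags.length = 0 then pvPreB rest
       else if PySem.Str.isIn "s" flags && !PySem.Str.isIn "O" flags then
         match rest with
         | [] => true
         | m :: rest2 =>
           PySem.Str.isIn ":" m && (pvSplit2 m).1.toList.head? == some 'm' &&
           (match rest2 with
            | [] => true
            | e :: rest3 =>
              PySem.Str.isIn ":" e && (pvSplit2 e).1.toList.head? == some 'e' && pvPreB rest3)
       else pvPreB rest)

def Pre_parse_comments_py (s : String) : Prop :=
  pvPreB ((PySem.Str.split? s ",").getD []) = true
instance (s : String) : Decidable (Pre_parse_comments_py s) := by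
  unfold Pre_parse_comments_py; infer_instance

def pvWitness_parse_comments_py : String := ":x"

def Spec_parse_comments_py (s : String) (out : List (List String)) : Prop :=
  out = parse_comments_py_alt s
instance (s : String) (out : List (List String)) : Decidable (Spec_parse_comments_py s out) := by
  unfold Spec_parse_comments_py; infer_instance

-- ===== CLAIM (what is proved, stated in full; the proofs are below) =====
def Claim_equal_parse_comments_py : Prop :=
  ∀ (s : String), Dom_parse_comments_py s → Pre_parse_comments_py s →
    Spec_parse_comments_py s (parse_comments_py s)

-- ===== LEMMAS AND PROOFS =====

-- A's rv-mutating consumption of a ready entry list: singles go in front, others at the back.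
def pvConsume : List (Bool × List String) → List (List String) → List (List String)
  | [], rv => rv
  | (true, e) :: rest, rv => pvConsume rest ([e] ++ rv)
  | (false, e) :: rest, rv => pvConsume rest (rv ++ [e])

theorem pvGoA_eq_consume (l : List String) (rv : List (List String)) :
    pvGoA l rv = pvConsume (pvGroupB (l.map pvSplit2)) rv := by
  fun_induction pvGoA l rv with
  | case1 rv => simp [pvGroupB, pvConsume]
  | case2 p rest rv flags text hsplit h0 ih =>
      simp [pvGroupB, pvConsume, *]
      all_goals simp_all [pvConsume]
  | case3 p rv flags text hsplit h0 hs =>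
      simp [pvGroupB, pvConsume, *]
      all_goals simp_all [pvConsume]
  | case4 p rv flags text hsplit h0 hs m mf mtext hm =>
      simp [pvGroupB, pvConsume, *]
      all_goals simp_all [pvConsume]
  | case5 p rv flags text hsplit h0 hs indent m mf mtext hm e rest3 ef etext he ih =>
      simp [pvGroupB, pvConsume, *]
      all_goals simp_all [pvConsume]
      all_goals rfl
  | case6 p rest rv flags text hsplit h0 hs hb hlen ih =>
      simp at hs
      have hT : ¬(PySem.Chars.isIn ['s'] flags.toList = true ∧
          PySem.Chars.isIn ['O'] flags.toList = false) := by
        rintro ⟨a, b⟩; rw [hs a] at b; cases b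
      simp [pvGroupB, pvConsume, hT, *]
      all_goals simp_all [pvConsume]
  | case7 p rest rv flags text hsplit h0 hs hb hlen ih =>
      simp at hs
      have hT : ¬(PySem.Chars.isIn ['s'] flags.toList = true ∧
          PySem.Chars.isIn ['O'] flags.toList = false) := by
        rintro ⟨a, b⟩; rw [hs a] at b; cases b
      simp [pvGroupB, pvConsume, hT, *]
      all_goals simp_all [pvConsume]
  | case8 p rest rv flags text hsplit h0 hs hb ih =>
      simp at hs hb
      have hT : ¬(PySem.Chars.isIn ['s'] flags.toList = true ∧
          PySem.Chars.isIn ['O'] flags.toList = false) := by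
        rintro ⟨a, b⟩; rw [hs a] at b; cases b
      simp [pvGroupB, pvConsume, hT, *]
      all_goals simp_all [pvConsume]

theorem pvConsume_eq_filters (entries : List (Bool × List String)) :
    ∀ rv, pvConsume entries rv =
      (entries.reverse.filter (·.1)).map (·.2) ++ rv ++
        (entries.filter (fun p => !p.1)).map (·.2) := by
  induction entries with
  | nil => intro rv; simp [pvConsume]
  | cons hd rest ih =>
      intro rv
      obtain ⟨b, e⟩ := hd
      cases b
      · simp only [pvConsume, ih, List.reverse_cons, List.filter_append, List.filter_cons,
          List.map_append, List.filter, List.map]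
        simp
      · simp only [pvConsume, ih, List.reverse_cons, List.filter_append, List.filter_cons,
          List.map_append, List.filter, List.map]
        simp

-- ===== VERDICT (by name: the statement is the Claim_ definition above) =====
theorem parse_comments_py_spec : Claim_equal_parse_comments_py := by
  intro s _ _
  unfold Spec_parse_comments_py parse_comments_py parse_comments_py_alt
  rw [pvGoA_eq_consume, pvConsume_eq_filters]
  simp
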